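-- pv_equiv track=rewrite | github.com/pypi-data/pypi-mirror-316 | packages/cycparser/cycparser-1.2.112-py3-none-any.whl/cycparser/repairing/fix_get_gpr_association.py | _get_monomers
-- ===== SOURCE A (Python) =====
-- from typing import Dict, List, Set
--
-- def _get_monomers(
--     cplx_or_monomer: str,
--     complexes: Dict[str, Set[str]],
-- ) -> Set[str]:
--     result: Set[str] = set()
--     if (components := complexes.get(cplx_or_monomer)) is not None:
--         for component in components:
--             if component in complexes:
--                 result.update(_get_monomers(component, complexes))
--             else:
--                 result.add(component)
--     else:  # doesn't necessarily need to be in monomers nor sequences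
--         result.add(cplx_or_monomer)
--     return result
-- ===== SOURCE B (Python) =====
-- def _get_monomers(cplx_or_monomer, complexes):
--     result = set()
--     expanded = set()
--     stack = [cplx_or_monomer]
--     while stack:
--         node = stack.pop()
--         components = complexes.get(node)
--         if components is None:
--             result.add(node)
--         elif node not in expanded:
--             expanded.add(node)
--             stack.extend(reversed(list(components)))
--     return result
-- ===== Notes on version B (the rewrite author's own statement) =====
-- stated objective: alternative
-- what changed: B replaces A's naive recursion (which rebuilds and unions a fresh monomer set per recursive call, revisiting shared sub-complexes) by a non-recursive worklist loop over an explicit stack with a visited set, so each complex is expanded at most once and one global result set is filled in place.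
import Mathlib
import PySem

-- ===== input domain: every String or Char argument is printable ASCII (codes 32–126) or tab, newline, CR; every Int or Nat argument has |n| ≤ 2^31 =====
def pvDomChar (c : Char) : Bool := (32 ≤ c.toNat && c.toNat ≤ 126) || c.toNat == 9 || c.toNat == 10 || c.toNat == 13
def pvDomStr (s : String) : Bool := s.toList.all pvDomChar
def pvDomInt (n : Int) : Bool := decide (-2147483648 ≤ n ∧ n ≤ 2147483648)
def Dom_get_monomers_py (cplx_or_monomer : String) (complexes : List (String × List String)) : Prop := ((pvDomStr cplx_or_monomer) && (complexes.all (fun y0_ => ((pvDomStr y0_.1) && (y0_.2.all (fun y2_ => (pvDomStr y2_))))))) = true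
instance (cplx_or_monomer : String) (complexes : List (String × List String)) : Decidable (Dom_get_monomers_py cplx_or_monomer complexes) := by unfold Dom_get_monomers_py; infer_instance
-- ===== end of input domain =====

-- B replaces A's naive recursion (a fresh per-call set union, recomputed for every shared
-- sub-complex) by a non-recursive worklist loop over an explicit stack with a visited set,
-- expanding each complex at most once.
-- Pre_ excludes inputs whose complex-reference key graph has a cycle reachable from the start
-- node: on those Python A recurses forever.

-- ===== PORT A =====
-- fuel only totalizes the recursion (Python A's recursion depth is unbounded on cyclic inputs,
-- which Pre_ excludes; under Pre_ the initial fuel size+1 is proved sufficient).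
def pyGetMonomersA (fuel : Nat) (d : PySem.Dict String (List String)) (node : String) : PySem.Set String :=
  match fuel with
  | 0 => PySem.Set.empty
  | fuel + 1 =>
    match d.get? node with
    | some components =>
        components.foldl
          (fun result component =>
            if d.contains component then
              PySem.Set.update result (pyGetMonomersA fuel d component)
            else
              PySem.Set.add result component)
          PySem.Set.empty
    | none => PySem.Set.add PySem.Set.empty node

def get_monomers_py (cplx_or_monomer : String) (complexes : List (String × List String)) : List String :=
  pyGetMonomersA ((PySem.Dict.ofList complexes).size + 1) (PySem.Dict.ofList complexes) cplx_or_monomer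

-- ===== PORT B =====
-- termination helper, cited by pyStackLoop's decreasing_by: expanding an unvisited key
-- strictly shrinks the list of keys not yet visited.
lemma pvFilterLt (p q : String → Bool) (keys : List String)
    (himp : ∀ k, q k = true → p k = true) (node : String) (hmem : node ∈ keys)
    (hp : p node = true) (hq : q node = false) :
    (keys.filter q).length < (keys.filter p).length := by
  have hle : ∀ l : List String, (l.filter q).length ≤ (l.filter p).length := by
    intro l
    rw [← List.countP_eq_length_filter, ← List.countP_eq_length_filter]
    exact List.countP_mono_left (fun a _ => himp a)
  induction keys with
  | nil => exact absurd hmem (List.not_mem_nil)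
  | cons a keys ih =>
      rcases List.mem_cons.mp hmem with rfl | hmem'
      · rw [List.filter_cons_of_neg (by simp [hq]), List.filter_cons_of_pos hp,
          List.length_cons]
        exact Nat.lt_succ_of_le (hle keys)
      · have h := ih hmem'
        cases hqa : q a with
        | false =>
            rw [List.filter_cons_of_neg (by simp [hqa]), List.filter_cons]
            split
            · rw [List.length_cons]; omega
            · exact h
        | true =>
            rw [List.filter_cons_of_pos hqa, List.filter_cons_of_pos (himp a hqa),
              List.length_cons, List.length_cons]
            omega

lemma pvUnvisDec (keys visited : List String) (node : String)
    (hmem : node ∈ keys) (hnv : ¬ node ∈ visited) :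
    (keys.filter (fun k => !(PySem.Set.contains (PySem.Set.add visited node) k))).length
      < (keys.filter (fun k => !(PySem.Set.contains visited k))).length := by
  apply pvFilterLt _ _ keys _ node hmem
  · show (!(PySem.Set.contains visited node)) = true
    cases h : PySem.Set.contains visited node with
    | false => rfl
    | true => exact absurd ((PySem.Set.contains_iff _ _).mp h) hnv
  · show (!(PySem.Set.contains (PySem.Set.add visited node) node)) = false
    rw [(PySem.Set.contains_iff _ _).mpr ((PySem.Set.mem_add _ _ _).mpr (Or.inr rfl))]
    rfl
  · intro k hk
    have hk2 : ¬ k ∈ PySem.Set.add visited node := by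
      intro hm
      rw [(PySem.Set.contains_iff _ _).mpr hm] at hk
      exact Bool.false_ne_true hk
    cases h : PySem.Set.contains visited k with
    | false => rfl
    | true =>
        exact absurd ((PySem.Set.mem_add _ _ _).mpr (Or.inl ((PySem.Set.contains_iff _ _).mp h))) hk2

def pyStackLoop (d : PySem.Dict String (List String))
    (visited result stack : List String) : List String :=
  match stack with
  | [] => result
  | node :: rest =>
    match hget : d.get? node with
    | none => pyStackLoop d visited (PySem.Set.add result node) rest
    | some comps =>
      if hvis : PySem.Set.contains visited node = true then
        pyStackLoop d visited result rest
      else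
        pyStackLoop d (PySem.Set.add visited node) result (comps ++ rest)
termination_by ((d.keys.filter (fun k => !(PySem.Set.contains visited k))).length, stack.length)
decreasing_by
  · exact Prod.Lex.right _ (by simp)
  · exact Prod.Lex.right _ (by simp)
  · exact Prod.Lex.left _ _ (pvUnvisDec d.keys visited node
      ((PySem.Dict.contains_iff_mem_keys _ _).mp
        (by rw [PySem.Dict.contains_eq_isSome_get?, hget]; rfl))
      (fun hm => hvis ((PySem.Set.contains_iff _ _).mpr hm)))

def get_monomers_py_alt (cplx_or_monomer : String) (complexes : List (String × List String)) : List String :=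
  pyStackLoop (PySem.Dict.ofList complexes) PySem.Set.empty PySem.Set.empty [cplx_or_monomer]

-- ===== PRECONDITION & SPEC =====
-- key graph of the complexes dict: nodes = keys, edges key -> component that is itself a key
def pvKeySet (complexes : List (String × List String)) : Finset String :=
  ((PySem.Dict.ofList complexes).keys).toFinset

def pvSucc (complexes : List (String × List String)) (x : String) : Finset String :=
  (((PySem.Dict.ofList complexes).getD x []).filter
    (fun c => (PySem.Dict.ofList complexes).contains c)).toFinset

def pvStep (complexes : List (String × List String)) (s : Finset String) : Finset String :=
  s ∪ s.biUnion (pvSucc complexes)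

-- all keys reachable from x in ≥ 1 key-edge steps (iterating size times saturates)
def pvReach (complexes : List (String × List String)) (x : String) : Finset String :=
  (pvStep complexes)^[(PySem.Dict.ofList complexes).size] (pvSucc complexes x)

-- keys reachable from the start node s (s itself, or reachable from it in ≥ 1 key-edge steps)
def pvGood (complexes : List (String × List String)) (s x : String) : Prop :=
  x = s ∨ x ∈ pvReach complexes s

-- Pre_ excludes exactly the inputs on which Python A's recursion diverges (RecursionError):
-- a cycle in the complex-reference key graph that is reachable from the start node; cycles
-- elsewhere in the dict are never visited by A and are admitted.
def Pre_get_monomers_py (cplx_or_monomer : String) (complexes : List (String × List String)) : Prop :=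
  ∀ k ∈ pvKeySet complexes, pvGood complexes cplx_or_monomer k → k ∉ pvReach complexes k

instance (cplx_or_monomer : String) (complexes : List (String × List String)) : Decidable (Pre_get_monomers_py cplx_or_monomer complexes) := by unfold Pre_get_monomers_py pvGood; infer_instance

def pvWitness_get_monomers_py : String × (List (String × List String)) :=
  ("CPLX-A", [("CPLX-A", ["CPLX-B", "m1"]), ("CPLX-B", ["m2", "m3"])])

def Spec_get_monomers_py (cplx_or_monomer : String) (complexes : List (String × List String)) (out : List String) : Prop := out = get_monomers_py_alt cplx_or_monomer complexes
instance (cplx_or_monomer : String) (complexes : List (String × List String)) (out : List String) : Decidable (Spec_get_monomers_py cplx_or_monomer complexes out) := by unfold Spec_get_monomers_py; infer_instance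

-- ===== CLAIM (what is proved, stated in full; the proofs are below) =====
def Claim_equal_get_monomers_py : Prop := ∀ (cplx_or_monomer : String) (complexes : List (String × List String)), Dom_get_monomers_py cplx_or_monomer complexes → Pre_get_monomers_py cplx_or_monomer complexes → Spec_get_monomers_py cplx_or_monomer complexes (get_monomers_py cplx_or_monomer complexes)


-- ===== LEMMAS AND PROOFS =====

-- proof-only helper: the recursive visited-set traversal; the worklist loop pyStackLoop is
-- related to it (pvStackSim) and it in turn to A's recursion (pvMain).
def pyGetMonomersB (fuel : Nat) (d : PySem.Dict String (List String))
    (acc : PySem.Set String × PySem.Set String) (node : String) :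
    PySem.Set String × PySem.Set String :=
  match fuel with
  | 0 => acc
  | fuel + 1 =>
    match d.get? node with
    | none => (acc.1, PySem.Set.add acc.2 node)
    | some components =>
        if PySem.Set.contains acc.1 node then acc
        else components.foldl (pyGetMonomersB fuel d) (PySem.Set.add acc.1 node, acc.2)

-- generic saturation machinery for iterated monotone Finset maps
lemma pvIterSubset (f : Finset String → Finset String) (hincl : ∀ s, s ⊆ f s) :
    ∀ (n : Nat) (s : Finset String), s ⊆ f^[n] s := by
  intro n
  induction n with
  | zero => intro s; simp
  | succ n ih =>
      intro s
      rw [Function.iterate_succ_apply]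
      exact (hincl s).trans (ih (f s))

lemma pvIterMono (f : Finset String → Finset String)
    (hmono : ∀ s t, s ⊆ t → f s ⊆ f t) :
    ∀ (n : Nat) (s t : Finset String), s ⊆ t → f^[n] s ⊆ f^[n] t := by
  intro n
  induction n with
  | zero => intro s t h; simpa using h
  | succ n ih =>
      intro s t h
      rw [Function.iterate_succ_apply, Function.iterate_succ_apply]
      exact ih _ _ (hmono _ _ h)

lemma pvIterInK (f : Finset String → Finset String) (K : Finset String)
    (hK : ∀ s, s ⊆ K → f s ⊆ K) :
    ∀ (n : Nat) (s : Finset String), s ⊆ K → f^[n] s ⊆ K := by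
  intro n
  induction n with
  | zero => intro s h; simpa using h
  | succ n ih =>
      intro s h
      rw [Function.iterate_succ_apply]
      exact ih _ (hK _ h)

lemma pvSaturate (f : Finset String → Finset String) (K : Finset String)
    (hincl : ∀ s, s ⊆ f s) (hK : ∀ s, s ⊆ K → f s ⊆ K) (hempty : f ∅ = ∅) :
    ∀ s : Finset String, s ⊆ K → f (f^[K.card] s) = f^[K.card] s := by
  intro s hs
  by_cases hex : ∃ i ≤ K.card, f (f^[i] s) = f^[i] s
  · obtain ⟨i, hi, hfix⟩ := hex
    have hfixed : ∀ m, f^[m] (f^[i] s) = f^[i] s := fun m => Function.iterate_fixed hfix m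
    have h1 : f^[K.card] s = f^[i] s := by
      have := hfixed (K.card - i)
      rw [← Function.iterate_add_apply] at this
      rwa [Nat.sub_add_cancel hi] at this
    rw [h1]; exact hfix
  · push Not at hex
    have grow : ∀ i, i ≤ K.card → s.card + i ≤ (f^[i] s).card := by
      intro i
      induction i with
      | zero => intro _; simp
      | succ i ih =>
          intro hi
          have hlt : f^[i] s ⊂ f^[i+1] s := by
            rw [Function.iterate_succ_apply']
            exact HasSubset.Subset.ssubset_of_ne (hincl _) (Ne.symm (hex i (Nat.le_of_succ_le hi)))
          have := Finset.card_lt_card hlt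
          have := ih (Nat.le_of_succ_le hi)
          omega
    have hsub : f^[K.card] s ⊆ K := pvIterInK f K hK _ _ hs
    have hcardle : (f^[K.card] s).card ≤ K.card := Finset.card_le_card hsub
    have := grow K.card le_rfl
    have hs0 : s.card = 0 := by omega
    have hsempty : s = ∅ := Finset.card_eq_zero.mp hs0
    exact absurd (by rw [hsempty]; simpa using hempty) (hex 0 (Nat.zero_le _))

-- basic facts about the key graph
lemma pvMemSucc (complexes : List (String × List String)) (x c : String) :
    c ∈ pvSucc complexes x ↔
      c ∈ (PySem.Dict.ofList complexes).getD x [] ∧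
        (PySem.Dict.ofList complexes).contains c = true := by
  simp [pvSucc]

lemma pvSuccSubK (complexes : List (String × List String)) (x : String) :
    pvSucc complexes x ⊆ pvKeySet complexes := by
  intro c hc
  rw [pvMemSucc] at hc
  rw [pvKeySet, List.mem_toFinset]
  exact (PySem.Dict.contains_iff_mem_keys _ _).mp hc.2

lemma pvStepIncl (complexes : List (String × List String)) (s : Finset String) :
    s ⊆ pvStep complexes s := Finset.subset_union_left

lemma pvStepMono (complexes : List (String × List String)) (s t : Finset String) (h : s ⊆ t) :
    pvStep complexes s ⊆ pvStep complexes t :=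
  Finset.union_subset_union h (Finset.biUnion_subset_biUnion_of_subset_left _ h)

lemma pvStepInK (complexes : List (String × List String)) (s : Finset String)
    (h : s ⊆ pvKeySet complexes) : pvStep complexes s ⊆ pvKeySet complexes := by
  refine Finset.union_subset h (Finset.biUnion_subset.mpr ?_)
  intro x _
  exact pvSuccSubK complexes x

lemma pvStepEmpty (complexes : List (String × List String)) : pvStep complexes ∅ = ∅ := by
  simp [pvStep]

lemma pvCardK (complexes : List (String × List String)) :
    (pvKeySet complexes).card = (PySem.Dict.ofList complexes).size := by
  rw [pvKeySet, List.toFinset_card_of_nodup (PySem.Dict.nodup_keys_ofList _)]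
  simp [PySem.Dict.keys, PySem.Dict.size]

lemma pvReachSubK (complexes : List (String × List String)) (x : String) :
    pvReach complexes x ⊆ pvKeySet complexes :=
  pvIterInK _ _ (fun _ h => pvStepInK complexes _ h) _ _ (pvSuccSubK complexes x)

lemma pvSuccSubReach (complexes : List (String × List String)) (x : String) :
    pvSucc complexes x ⊆ pvReach complexes x :=
  pvIterSubset _ (fun s => pvStepIncl complexes s) _ _

lemma pvReachFix (complexes : List (String × List String)) (x : String) :
    pvStep complexes (pvReach complexes x) = pvReach complexes x := by
  rw [pvReach, ← pvCardK complexes]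
  exact pvSaturate _ _ (fun s => pvStepIncl complexes s) (fun s h => pvStepInK complexes s h)
    (pvStepEmpty complexes) _ (pvSuccSubK complexes x)

lemma pvReachTrans (complexes : List (String × List String)) {x c : String}
    (hc : c ∈ pvReach complexes x) : pvReach complexes c ⊆ pvReach complexes x := by
  have hsucc : pvSucc complexes c ⊆ pvReach complexes x := by
    have h1 : pvSucc complexes c ⊆ pvStep complexes (pvReach complexes x) :=
      subset_trans (Finset.subset_biUnion_of_mem (pvSucc complexes) hc) Finset.subset_union_right
    rwa [pvReachFix complexes x] at h1
  have h2 : (pvStep complexes)^[(PySem.Dict.ofList complexes).size] (pvSucc complexes c)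
      ⊆ (pvStep complexes)^[(PySem.Dict.ofList complexes).size] (pvReach complexes x) :=
    pvIterMono _ (fun s t h => pvStepMono complexes s t h) _ _ _ hsucc
  have h3 := Function.iterate_fixed (pvReachFix complexes x) ((PySem.Dict.ofList complexes).size)
  exact fun y hy => h3 ▸ h2 hy

lemma pvContainsMemK (complexes : List (String × List String)) {x : String}
    (hx : (PySem.Dict.ofList complexes).contains x = true) : x ∈ pvKeySet complexes := by
  rw [pvKeySet, List.mem_toFinset]
  exact (PySem.Dict.contains_iff_mem_keys _ _).mp hx

-- goodness (reachability from the start) is preserved along key edges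
lemma pvGoodSucc (complexes : List (String × List String)) (s x c : String)
    (hg : pvGood complexes s x) (hc : c ∈ pvSucc complexes x) : pvGood complexes s c := by
  cases hg with
  | inl h =>
      subst h
      exact Or.inr (pvSuccSubReach complexes x hc)
  | inr h => exact Or.inr (pvReachTrans complexes h (pvSuccSubReach complexes x hc))

-- under Pre_, the reachable set strictly shrinks along a key edge out of a good node
lemma pvRankLt (complexes : List (String × List String)) (s : String)
    (hPre : ∀ k ∈ pvKeySet complexes, pvGood complexes s k → k ∉ pvReach complexes k)
    {x c : String} (hg : pvGood complexes s x) (hc : c ∈ pvSucc complexes x) :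
    (pvReach complexes c).card < (pvReach complexes x).card := by
  have hcR : c ∈ pvReach complexes x := pvSuccSubReach complexes x hc
  have hcK : c ∈ pvKeySet complexes := pvSuccSubK complexes x hc
  have hnc : c ∉ pvReach complexes c := hPre c hcK (pvGoodSucc complexes s x c hg hc)
  have hsub : pvReach complexes c ⊆ pvReach complexes x := pvReachTrans complexes hcR
  exact Finset.card_lt_card (Finset.ssubset_iff_of_subset hsub |>.mpr ⟨c, hcR, hnc⟩)

lemma pvCardReachLe (complexes : List (String × List String)) (s : String)
    (hPre : ∀ k ∈ pvKeySet complexes, pvGood complexes s k → k ∉ pvReach complexes k)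
    {x : String} (hg : pvGood complexes s x)
    (hx : (PySem.Dict.ofList complexes).contains x = true) :
    (pvReach complexes x).card + 2 ≤ (PySem.Dict.ofList complexes).size + 1 := by
  have hxK : x ∈ pvKeySet complexes := pvContainsMemK complexes hx
  have hlt : (pvReach complexes x).card < (pvKeySet complexes).card :=
    Finset.card_lt_card (Finset.ssubset_iff_of_subset (pvReachSubK complexes x) |>.mpr
      ⟨x, hxK, hPre x hxK hg⟩)
  rw [pvCardK complexes] at hlt
  omega

-- stability of A's fuelled recursion: any two sufficient fuels give the same result
lemma pvAStab (complexes : List (String × List String)) (s : String)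
    (hPre : ∀ k ∈ pvKeySet complexes, pvGood complexes s k → k ∉ pvReach complexes k) :
    ∀ (f1 f2 : Nat) (x : String), 1 ≤ f1 → 1 ≤ f2 →
      ((PySem.Dict.ofList complexes).contains x = true → pvGood complexes s x) →
      ((PySem.Dict.ofList complexes).contains x = true →
        (pvReach complexes x).card + 2 ≤ f1 ∧ (pvReach complexes x).card + 2 ≤ f2) →
      pyGetMonomersA f1 (PySem.Dict.ofList complexes) x
        = pyGetMonomersA f2 (PySem.Dict.ofList complexes) x := by
  intro f1
  induction f1 with
  | zero => intro f2 x h1 _ _ _; omega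
  | succ f1 ih =>
      intro f2 x _ h2 hg hb
      obtain ⟨g, rfl⟩ : ∃ g, f2 = g + 1 := ⟨f2 - 1, by omega⟩
      cases hget : (PySem.Dict.ofList complexes).get? x with
      | none => simp [pyGetMonomersA, hget]
      | some comps =>
          have hx : (PySem.Dict.ofList complexes).contains x = true := by
            rw [PySem.Dict.contains_eq_isSome_get?, hget]; rfl
          obtain ⟨hb1, hb2⟩ := hb hx
          have hgood := hg hx
          simp only [pyGetMonomersA, hget]
          apply PySem.List.foldl_congr_mem
          intro acc c hcmem
          by_cases hc : (PySem.Dict.ofList complexes).contains c = true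
          · have hcs : c ∈ pvSucc complexes x := by
              rw [pvMemSucc]
              exact ⟨by rwa [PySem.Dict.getD_of_get?_eq_some _ [] hget], hc⟩
            have hlt := pvRankLt complexes s hPre hgood hcs
            rw [if_pos hc, if_pos hc,
              ih g c (by omega) (by omega) (fun _ => pvGoodSucc complexes s x c hgood hcs)
                (fun _ => ⟨by omega, by omega⟩)]
          · simp [hc]

-- Set algebra lemmas used to relate the two recursions
lemma pvUpdOfList (r s : List String) :
    PySem.Set.update r (PySem.Set.ofList s) = PySem.Set.update r s := by
  rw [PySem.Set.update_eq_append_filter, PySem.Set.update_eq_append_filter,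
    PySem.Set.ofList_ofList]

lemma pvAddUpd (r s : List String) (c : String) :
    PySem.Set.add (PySem.Set.update r s) c = PySem.Set.update r (PySem.Set.add s c) := by
  by_cases hc : c ∈ s
  · rw [PySem.Set.add_of_mem hc,
      PySem.Set.add_of_mem ((PySem.Set.mem_update r s c).mpr (Or.inr hc))]
  · rw [PySem.Set.add_of_not_mem hc, PySem.Set.update_append, PySem.Set.update_cons,
      PySem.Set.update_nil]

lemma pvUpdUpd (l : List String) : ∀ (r s : List String),
    PySem.Set.update r (PySem.Set.update s l)
      = PySem.Set.update (PySem.Set.update r s) l := by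
  induction l with
  | nil => intro r s; rw [PySem.Set.update_nil, PySem.Set.update_nil]
  | cons c l ih =>
      intro r s
      rw [PySem.Set.update_cons, PySem.Set.update_cons, ih, pvAddUpd]

lemma pvUpdSubsetId (l : List String) : ∀ (r : List String), (∀ y ∈ l, y ∈ r) →
    PySem.Set.update r l = r := by
  induction l with
  | nil => intro r _; rw [PySem.Set.update_nil]
  | cons c l ih =>
      intro r h
      rw [PySem.Set.update_cons, PySem.Set.add_of_mem (h c (by simp))]
      exact ih r (fun y hy => h y (by simp [hy]))

lemma pvUpdSingleton (r : List String) (c : String) :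
    PySem.Set.update r [c] = PySem.Set.add r c := by
  rw [PySem.Set.update_cons, PySem.Set.update_nil]

-- A's inner loop started from an arbitrary accumulator factors through the one from ∅
lemma pvFoldlAUpdate (p : String → Bool) (g : String → List String) :
    ∀ (comps : List String) (r : List String),
      comps.foldl (fun acc c => if p c then PySem.Set.update acc (g c) else PySem.Set.add acc c) r
        = PySem.Set.update r
            (comps.foldl
              (fun acc c => if p c then PySem.Set.update acc (g c) else PySem.Set.add acc c)
              PySem.Set.empty) := by
  intro comps
  induction comps with
  | nil =>
      intro r
      rw [List.foldl_nil, List.foldl_nil]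
      show r = PySem.Set.update r []
      rw [PySem.Set.update_nil]
  | cons c l ih =>
      intro r
      have hstep : (if p c then PySem.Set.update r (g c) else PySem.Set.add r c)
          = PySem.Set.update r
              (if p c then PySem.Set.update PySem.Set.empty (g c)
               else PySem.Set.add PySem.Set.empty c) := by
        by_cases hp : p c
        · rw [if_pos hp, if_pos hp]
          show PySem.Set.update r (g c) = PySem.Set.update r (PySem.Set.update [] (g c))
          rw [PySem.Set.update_nil_left, pvUpdOfList]
        · rw [if_neg hp, if_neg hp]
          show PySem.Set.add r c = PySem.Set.update r (PySem.Set.add [] c)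
          have : PySem.Set.add ([] : List String) c = [c] := rfl
          rw [this, pvUpdSingleton]
      rw [List.foldl_cons, List.foldl_cons, ih, ih ((if p c then _ else _)), hstep, pvUpdUpd]

-- A's result is duplicate-free (it is built by Set.add / Set.update from ∅)
lemma pvFoldNodup (p : String → Bool) (g : String → List String) (comps : List String) :
    ∀ (r : List String), r.Nodup →
      (comps.foldl (fun acc c => if p c then PySem.Set.update acc (g c) else PySem.Set.add acc c) r).Nodup := by
  induction comps with
  | nil => intro r h; simpa
  | cons c l ih =>
      intro r h
      rw [List.foldl_cons]
      apply ih
      by_cases hp : p c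
      · rw [if_pos hp]; exact PySem.Set.nodup_update _ _ h
      · rw [if_neg hp]; exact PySem.Set.nodup_add _ _ h

lemma pvANodup (complexes : List (String × List String)) :
    ∀ (fuel : Nat) (x : String),
      (pyGetMonomersA fuel (PySem.Dict.ofList complexes) x).Nodup := by
  intro fuel x
  cases fuel with
  | zero => simp [pyGetMonomersA, PySem.Set.empty]
  | succ f =>
      cases hget : (PySem.Dict.ofList complexes).get? x with
      | none => simp [pyGetMonomersA, hget, PySem.Set.add, PySem.Set.empty]
      | some comps =>
          simp only [pyGetMonomersA, hget]
          exact pvFoldNodup _ _ comps PySem.Set.empty List.nodup_nil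

-- invariant carried by the traversal: every visited node is a key whose full monomer set is
-- already in the result, unless it is a still-pending ancestor (listed in P)
def pvInv (complexes : List (String × List String)) (P : List String)
    (visited result : List String) : Prop :=
  ∀ v ∈ visited, (PySem.Dict.ofList complexes).contains v = true ∧
    (v ∈ P ∨ ∀ y ∈ pyGetMonomersA ((PySem.Dict.ofList complexes).size + 1)
        (PySem.Dict.ofList complexes) v, y ∈ result)

lemma pvInvMono (complexes : List (String × List String)) (P : List String)
    (visited r1 r2 : List String) (hsub : ∀ y ∈ r1, y ∈ r2) :
    pvInv complexes P visited r1 → pvInv complexes P visited r2 := by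
  intro h v hv
  obtain ⟨h1, h2⟩ := h v hv
  exact ⟨h1, h2.imp id (fun hc y hy => hsub y (hc y hy))⟩

-- main simulation lemma: the visited-set traversal computes result.update(A node), and the
-- invariant is maintained
lemma pvMain (complexes : List (String × List String)) (s : String)
    (hPre : ∀ k ∈ pvKeySet complexes, pvGood complexes s k → k ∉ pvReach complexes k) :
    ∀ (fuel : Nat) (x : String) (P visited result : List String),
      1 ≤ fuel →
      ((PySem.Dict.ofList complexes).contains x = true → pvGood complexes s x) →
      ((PySem.Dict.ofList complexes).contains x = true →
        (pvReach complexes x).card + 2 ≤ fuel) →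
      ((PySem.Dict.ofList complexes).contains x = true →
        ∀ p ∈ P, p ≠ x ∧ p ∉ pvReach complexes x) →
      pvInv complexes P visited result →
      (pyGetMonomersB fuel (PySem.Dict.ofList complexes) (visited, result) x).2
          = PySem.Set.update result (pyGetMonomersA fuel (PySem.Dict.ofList complexes) x)
        ∧ pvInv complexes P
            (pyGetMonomersB fuel (PySem.Dict.ofList complexes) (visited, result) x).1
            (pyGetMonomersB fuel (PySem.Dict.ofList complexes) (visited, result) x).2 := by
  intro fuel
  induction fuel with
  | zero => intro x P visited result h1; omega
  | succ f ihf =>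
      intro x P visited result _ hg hb hH hInv
      cases hget : (PySem.Dict.ofList complexes).get? x with
      | none =>
          have hBeq : pyGetMonomersB (f+1) (PySem.Dict.ofList complexes) (visited, result) x
              = (visited, PySem.Set.add result x) := by
            simp [pyGetMonomersB, hget]
          have hAeq : pyGetMonomersA (f+1) (PySem.Dict.ofList complexes) x
              = PySem.Set.add PySem.Set.empty x := by
            simp [pyGetMonomersA, hget]
          rw [hBeq, hAeq]
          constructor
          · show PySem.Set.add result x = PySem.Set.update result (PySem.Set.add [] x)
            have : PySem.Set.add ([] : List String) x = [x] := rfl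
            rw [this, pvUpdSingleton]
          · exact pvInvMono complexes P visited result _
              (fun y hy => (PySem.Set.mem_add _ _ _).mpr (Or.inl hy)) hInv
      | some comps =>
          have hx : (PySem.Dict.ofList complexes).contains x = true := by
            rw [PySem.Dict.contains_eq_isSome_get?, hget]; rfl
          have hbd := hb hx
          have hgood := hg hx
          have hxK : x ∈ pvKeySet complexes := pvContainsMemK complexes hx
          have hAN : pyGetMonomersA (f+1) (PySem.Dict.ofList complexes) x
              = pyGetMonomersA ((PySem.Dict.ofList complexes).size + 1)
                  (PySem.Dict.ofList complexes) x := by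
            apply pvAStab complexes s hPre (f+1) _ x (by omega)
              (by have := pvCardReachLe complexes s hPre hgood hx; omega)
              (fun _ => hgood)
            intro _
            exact ⟨hbd, pvCardReachLe complexes s hPre hgood hx⟩
          by_cases hvis : PySem.Set.contains visited x = true
          · have hBeq : pyGetMonomersB (f+1) (PySem.Dict.ofList complexes) (visited, result) x
                = (visited, result) := by
              simp only [pyGetMonomersB, hget]
              rw [if_pos hvis]
            rw [hBeq]
            have hxv : x ∈ visited := (PySem.Set.contains_iff _ _).mp hvis
            obtain ⟨_, hcase⟩ := hInv x hxv
            have hcov : ∀ y ∈ pyGetMonomersA ((PySem.Dict.ofList complexes).size + 1)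
                (PySem.Dict.ofList complexes) x, y ∈ result := by
              cases hcase with
              | inl hP => exact absurd rfl ((hH hx x hP).1)
              | inr h => exact h
            constructor
            · show result = _
              rw [hAN]
              exact (pvUpdSubsetId _ result hcov).symm
            · exact hInv
          · have hBeq : pyGetMonomersB (f+1) (PySem.Dict.ofList complexes) (visited, result) x
                = comps.foldl (pyGetMonomersB f (PySem.Dict.ofList complexes))
                    (PySem.Set.add visited x, result) := by
              simp only [pyGetMonomersB, hget]
              rw [if_neg hvis]
            have hf1 : 1 ≤ f := by omega
            have hcomps : ∀ c ∈ comps, c ∈ (PySem.Dict.ofList complexes).getD x [] := by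
              intro c hc
              rwa [PySem.Dict.getD_of_get?_eq_some _ [] hget]
            -- per-component facts
            have hcfact : ∀ c ∈ comps, (PySem.Dict.ofList complexes).contains c = true →
                (pvGood complexes s c ∧ (pvReach complexes c).card + 2 ≤ f ∧
                  ∀ p ∈ x :: P, p ≠ c ∧ p ∉ pvReach complexes c) := by
              intro c hc hck
              have hcs : c ∈ pvSucc complexes x := by
                rw [pvMemSucc]; exact ⟨hcomps c hc, hck⟩
              have hcR : c ∈ pvReach complexes x := pvSuccSubReach complexes x hcs
              have hlt := pvRankLt complexes s hPre hgood hcs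
              have htrans := pvReachTrans complexes hcR
              have hxnR : x ∉ pvReach complexes x := hPre x hxK hgood
              refine ⟨pvGoodSucc complexes s x c hgood hcs, ?_, ?_⟩
              · omega
              · intro p hp
                cases hp with
                | head =>
                    refine ⟨fun hxc => hxnR (hxc ▸ hcR), fun hxc => hxnR (htrans hxc)⟩
                | tail _ hpP =>
                    obtain ⟨hpx, hpR⟩ := hH hx p hpP
                    exact ⟨fun hpc => hpR (hpc ▸ hcR), fun hpc => hpR (htrans hpc)⟩
            -- the inner fold, by induction on the component list
            have hF : ∀ (l : List String), (∀ c ∈ l, c ∈ comps) →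
                ∀ (v r : List String), pvInv complexes (x :: P) v r →
                  ((l.foldl (pyGetMonomersB f (PySem.Dict.ofList complexes)) (v, r)).2
                      = l.foldl
                          (fun acc c =>
                            if (PySem.Dict.ofList complexes).contains c then
                              PySem.Set.update acc
                                (pyGetMonomersA f (PySem.Dict.ofList complexes) c)
                            else PySem.Set.add acc c) r
                    ∧ pvInv complexes (x :: P)
                        (l.foldl (pyGetMonomersB f (PySem.Dict.ofList complexes)) (v, r)).1
                        (l.foldl (pyGetMonomersB f (PySem.Dict.ofList complexes)) (v, r)).2) := by
              intro l
              induction l with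
              | nil => intro _ v r hInv'; exact ⟨rfl, hInv'⟩
              | cons c l ihl =>
                  intro hmem v r hInv'
                  have hcfacts := fun hck => hcfact c (hmem c (by simp)) hck
                  have hstep := ihf c (x :: P) v r hf1
                    (fun hck => (hcfacts hck).1) (fun hck => (hcfacts hck).2.1)
                    (fun hck => (hcfacts hck).2.2) hInv'
                  obtain ⟨hs2, hsInv⟩ := hstep
                  have hcA : (pyGetMonomersB f (PySem.Dict.ofList complexes) (v, r) c).2
                      = (if (PySem.Dict.ofList complexes).contains c then
                          PySem.Set.update r (pyGetMonomersA f (PySem.Dict.ofList complexes) c)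
                        else PySem.Set.add r c) := by
                    by_cases hck : (PySem.Dict.ofList complexes).contains c = true
                    · rw [hs2, if_pos hck]
                    · rw [hs2, if_neg hck]
                      obtain ⟨g, rfl⟩ : ∃ g, f = g + 1 := ⟨f - 1, by omega⟩
                      have hnone : (PySem.Dict.ofList complexes).get? c = none := by
                        rw [PySem.Dict.get?_eq_none_iff_contains]
                        simpa using hck
                      have : pyGetMonomersA (g+1) (PySem.Dict.ofList complexes) c
                          = PySem.Set.add PySem.Set.empty c := by
                        simp [pyGetMonomersA, hnone]
                      rw [this]
                      show PySem.Set.update r (PySem.Set.add [] c) = PySem.Set.add r c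
                      have h1 : PySem.Set.add ([] : List String) c = [c] := rfl
                      rw [h1, pvUpdSingleton]
                  have hrec := ihl (fun c' hc' => hmem c' (by simp [hc']))
                    (pyGetMonomersB f (PySem.Dict.ofList complexes) (v, r) c).1
                    (pyGetMonomersB f (PySem.Dict.ofList complexes) (v, r) c).2 hsInv
                  rw [List.foldl_cons, List.foldl_cons, ← hcA]
                  constructor
                  · exact hrec.1
                  · exact hrec.2
            have hInvx : pvInv complexes (x :: P) (PySem.Set.add visited x) result := by
              intro v hv
              rcases (PySem.Set.mem_add visited x v).mp hv with hvv | rfl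
              · obtain ⟨h1, h2⟩ := hInv v hvv
                exact ⟨h1, h2.imp (fun hP => by simp [hP]) id⟩
              · exact ⟨hx, Or.inl (by simp)⟩
            have hFres := hF comps (fun _ h => h) (PySem.Set.add visited x) result hInvx
            obtain ⟨hr2, hrInv⟩ := hFres
            have hAfold : pyGetMonomersA (f+1) (PySem.Dict.ofList complexes) x
                = comps.foldl
                    (fun acc c =>
                      if (PySem.Dict.ofList complexes).contains c then
                        PySem.Set.update acc
                          (pyGetMonomersA f (PySem.Dict.ofList complexes) c)
                      else PySem.Set.add acc c) PySem.Set.empty := by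
              simp [pyGetMonomersA, hget]
            have hmain :
                (pyGetMonomersB (f+1) (PySem.Dict.ofList complexes) (visited, result) x).2
                  = PySem.Set.update result
                      (pyGetMonomersA (f+1) (PySem.Dict.ofList complexes) x) := by
              rw [hBeq, hr2, hAfold,
                pvFoldlAUpdate (fun c => (PySem.Dict.ofList complexes).contains c)
                  (fun c => pyGetMonomersA f (PySem.Dict.ofList complexes) c) comps result]
            refine ⟨hmain, ?_⟩
            -- restore the invariant for the original pending list P
            have hcovx : ∀ y ∈ pyGetMonomersA ((PySem.Dict.ofList complexes).size + 1)
                (PySem.Dict.ofList complexes) x,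
                y ∈ (comps.foldl (pyGetMonomersB f (PySem.Dict.ofList complexes))
                  (PySem.Set.add visited x, result)).2 := by
              intro y hy
              rw [← hBeq, hmain, ← hAN] at *
              exact (PySem.Set.mem_update _ _ _).mpr (Or.inr hy)
            rw [hBeq]
            intro v hv
            obtain ⟨h1, h2⟩ := hrInv v hv
            refine ⟨h1, ?_⟩
            cases h2 with
            | inl hP =>
                cases hP with
                | head => exact Or.inr hcovx
                | tail _ hPP => exact Or.inl hPP
            | inr hcov => exact Or.inr hcov

-- unfolding equations for the worklist loop
lemma pvLoopNil (d : PySem.Dict String (List String)) (v r : List String) :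
    pyStackLoop d v r [] = r := by
  rw [pyStackLoop]

lemma pvLoopNone (d : PySem.Dict String (List String)) (v r : List String)
    (node : String) (rest : List String) (h : d.get? node = none) :
    pyStackLoop d v r (node :: rest) = pyStackLoop d v (PySem.Set.add r node) rest := by
  rw [pyStackLoop]
  split
  · rfl
  · rename_i comps heq
    rw [h] at heq
    cases heq

lemma pvLoopVis (d : PySem.Dict String (List String)) (v r : List String)
    (node : String) (rest comps : List String) (h : d.get? node = some comps)
    (hv : PySem.Set.contains v node = true) :
    pyStackLoop d v r (node :: rest) = pyStackLoop d v r rest := by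
  rw [pyStackLoop]
  split
  · rename_i heq
    rw [h] at heq
    cases heq
  · rename_i comps' heq
    rw [dif_pos hv]

lemma pvLoopExp (d : PySem.Dict String (List String)) (v r : List String)
    (node : String) (rest comps : List String) (h : d.get? node = some comps)
    (hv : ¬ PySem.Set.contains v node = true) :
    pyStackLoop d v r (node :: rest) = pyStackLoop d (PySem.Set.add v node) r (comps ++ rest) := by
  rw [pyStackLoop]
  split
  · rename_i heq
    rw [h] at heq
    cases heq
  · rename_i comps' heq
    rw [h] at heq
    cases heq
    rw [dif_neg hv]

-- the worklist loop simulates one step of the recursive visited-set traversal: popping x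
-- from the stack is the same as applying pyGetMonomersB to x and continuing with the rest
lemma pvStackSim (complexes : List (String × List String)) (s : String)
    (hPre : ∀ k ∈ pvKeySet complexes, pvGood complexes s k → k ∉ pvReach complexes k) :
    ∀ (g : Nat) (x : String) (v r S : List String), 1 ≤ g →
      ((PySem.Dict.ofList complexes).contains x = true → pvGood complexes s x) →
      ((PySem.Dict.ofList complexes).contains x = true →
        (pvReach complexes x).card + 2 ≤ g) →
      pyStackLoop (PySem.Dict.ofList complexes) v r (x :: S)
        = pyStackLoop (PySem.Dict.ofList complexes)
            (pyGetMonomersB g (PySem.Dict.ofList complexes) (v, r) x).1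
            (pyGetMonomersB g (PySem.Dict.ofList complexes) (v, r) x).2 S := by
  intro g
  induction g with
  | zero => intro x v r S h1; omega
  | succ f ihg =>
      intro x v r S _ hg hb
      cases hget : (PySem.Dict.ofList complexes).get? x with
      | none =>
          rw [pvLoopNone _ _ _ _ _ hget]
          simp [pyGetMonomersB, hget]
      | some comps =>
          have hx : (PySem.Dict.ofList complexes).contains x = true := by
            rw [PySem.Dict.contains_eq_isSome_get?, hget]; rfl
          have hbd := hb hx
          have hgood := hg hx
          have hf1 : 1 ≤ f := by
            have : 0 ≤ (pvReach complexes x).card := Nat.zero_le _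
            omega
          by_cases hvis : PySem.Set.contains v x = true
          · rw [pvLoopVis _ _ _ _ _ _ hget hvis]
            simp only [pyGetMonomersB, hget]
            rw [if_pos hvis]
          · have hcb : ∀ c ∈ comps, (PySem.Dict.ofList complexes).contains c = true →
                (pvGood complexes s c ∧ (pvReach complexes c).card + 2 ≤ f) := by
              intro c hc hck
              have hcs : c ∈ pvSucc complexes x := by
                rw [pvMemSucc]
                exact ⟨by rwa [PySem.Dict.getD_of_get?_eq_some _ [] hget], hck⟩
              have := pvRankLt complexes s hPre hgood hcs
              exact ⟨pvGoodSucc complexes s x c hgood hcs, by omega⟩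
            have hinner : ∀ (l : List String), (∀ c ∈ l, c ∈ comps) →
                ∀ (p : PySem.Set String × PySem.Set String),
                pyStackLoop (PySem.Dict.ofList complexes) p.1 p.2 (l ++ S)
                  = pyStackLoop (PySem.Dict.ofList complexes)
                      (l.foldl (pyGetMonomersB f (PySem.Dict.ofList complexes)) p).1
                      (l.foldl (pyGetMonomersB f (PySem.Dict.ofList complexes)) p).2 S := by
              intro l
              induction l with
              | nil => intro _ p; rfl
              | cons c l ihl =>
                  intro hmem p
                  rw [List.cons_append,
                    ihg c p.1 p.2 (l ++ S) hf1
                      (fun hck => (hcb c (hmem c (by simp)) hck).1)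
                      (fun hck => (hcb c (hmem c (by simp)) hck).2),
                    List.foldl_cons]
                  exact ihl (fun c' hc' => hmem c' (by simp [hc'])) _
            rw [pvLoopExp _ _ _ _ _ _ hget hvis,
              hinner comps (fun _ h => h) (PySem.Set.add v x, r)]
            simp only [pyGetMonomersB, hget]
            rw [if_neg hvis]

-- ===== VERDICT (by name: the statement is the Claim_ definition above) =====
theorem get_monomers_py_spec : Claim_equal_get_monomers_py := by
  intro s complexes _ hPre
  unfold Spec_get_monomers_py get_monomers_py get_monomers_py_alt
  have hstack := pvStackSim complexes s hPre ((PySem.Dict.ofList complexes).size + 1) s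
    PySem.Set.empty PySem.Set.empty [] (by omega) (fun _ => Or.inl rfl)
    (fun hx => pvCardReachLe complexes s hPre (Or.inl rfl) hx)
  have hmain := pvMain complexes s hPre ((PySem.Dict.ofList complexes).size + 1) s []
    PySem.Set.empty PySem.Set.empty (by omega) (fun _ => Or.inl rfl)
    (fun hx => pvCardReachLe complexes s hPre (Or.inl rfl) hx)
    (fun _ p hp => absurd hp (List.not_mem_nil))
    (fun v hv => absurd hv (List.not_mem_nil))
  rw [hstack, pvLoopNil, hmain.1]
  show _ = PySem.Set.update [] _
  rw [PySem.Set.update_nil_left]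
  exact (PySem.Set.ofList_eq_self_of_nodup _
    (pvANodup complexes ((PySem.Dict.ofList complexes).size + 1) s)).symm
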